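-- pv_equiv track=rewrite | github.com/christianebacani/Roadmap | Coding Challenges using Python and SQL/Code Wars Python Solved Problems/8 Kyu/price_of_mangoes.py | mango
-- ===== SOURCE A (Python) =====
-- def mango(quantity: int, price: int) -> int:
--     total_price = 0
--
--     while quantity > 0:
--         if quantity % 3 == 0:
--             pass
--
--         else:
--             total_price += price
--
--         quantity -= 1
--
--     return total_price
-- ===== SOURCE B (Python) =====
-- def mango(quantity: int, price: int) -> int:
--     if quantity <= 0:
--         return 0
--     return price * (quantity - quantity // 3)
-- ===== Notes on version B (the rewrite author's own statement) =====
-- stated objective: faster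
-- what changed: Replaced the countdown loop that adds price for each non-multiple of 3 with the closed form price*(quantity - quantity//3).
import Mathlib
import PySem

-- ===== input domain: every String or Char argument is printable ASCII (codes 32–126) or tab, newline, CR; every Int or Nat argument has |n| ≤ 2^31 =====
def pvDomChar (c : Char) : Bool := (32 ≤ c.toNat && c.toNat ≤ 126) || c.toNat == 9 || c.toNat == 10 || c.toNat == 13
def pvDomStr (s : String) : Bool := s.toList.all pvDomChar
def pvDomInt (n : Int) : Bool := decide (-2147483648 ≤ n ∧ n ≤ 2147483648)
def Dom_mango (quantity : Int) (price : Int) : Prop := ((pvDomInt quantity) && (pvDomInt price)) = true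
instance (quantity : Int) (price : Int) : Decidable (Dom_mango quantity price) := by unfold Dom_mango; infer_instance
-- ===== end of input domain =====

-- B replaces A's per-unit countdown loop with the closed form price*(quantity - quantity//3) (O(1) vs O(n)).
-- ===== PORT A =====
def mangoGo (quantity : Int) (price : Int) (total_price : Int) : Int :=
  if quantity > 0 then
    mangoGo (quantity - 1) price
      (if PySem.Int.mod quantity 3 = 0 then total_price else total_price + price)
  else total_price
termination_by quantity.toNat
decreasing_by omega

def mango (quantity : Int) (price : Int) : Int := mangoGo quantity price 0

-- ===== PORT B =====
def mango_alt (quantity : Int) (price : Int) : Int :=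
  if quantity ≤ 0 then 0
  else price * (quantity - PySem.Int.floordiv quantity 3)

-- ===== PRECONDITION & SPEC =====
def Spec_mango (quantity : Int) (price : Int) (out : Int) : Prop := out = mango_alt quantity price
instance (quantity : Int) (price : Int) (out : Int) : Decidable (Spec_mango quantity price out) := by unfold Spec_mango; infer_instance

-- ===== CLAIM (what is proved, stated in full; the proofs are below) =====
def Claim_equal_mango : Prop := ∀ (quantity : Int) (price : Int), Dom_mango quantity price → Spec_mango quantity price (mango quantity price)

-- ===== LEMMAS AND PROOFS =====

-- ===== VERDICT (by name: the statement is the Claim_ definition above) =====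
theorem mangoGo_eq (price : Int) : ∀ (n : Nat) (t : Int),
    mangoGo (n : Int) price t = t + price * ((n : Int) - (n : Int) / 3) := by
  intro n
  induction n with
  | zero => intro t; unfold mangoGo; norm_num
  | succ m ih =>
    intro t
    unfold mangoGo
    rw [if_pos (by positivity)]
    have h3 : PySem.Int.mod ((m : Int) + 1) 3 = ((m : Int) + 1) % 3 :=
      PySem.Int.mod_eq_emod_of_pos (by norm_num : (0:Int) < 3)
    push_cast
    rw [h3]
    have harg : ((m : Int) + 1 - 1) = (m : Int) := by ring
    rw [harg, ih]
    have hm3 : ((m : Int) + 1) % 3 = 0 ∨ ((m : Int) + 1) % 3 ≠ 0 := em _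
    rcases hm3 with h | h
    · rw [if_pos h]
      have hdiv : ((m : Int) + 1) / 3 = (m : Int) / 3 + 1 := by omega
      rw [hdiv]; ring
    · rw [if_neg h]
      have hdiv : ((m : Int) + 1) / 3 = (m : Int) / 3 := by omega
      rw [hdiv]; ring

theorem mango_spec : Claim_equal_mango := by
  intro quantity price _
  unfold Spec_mango mango mango_alt
  by_cases h : quantity ≤ 0
  · rw [if_pos h]
    unfold mangoGo
    rw [if_neg (by omega)]
  · rw [if_neg h]
    obtain ⟨n, rfl⟩ : ∃ n : Nat, quantity = (n : Int) :=
      ⟨quantity.toNat, by omega⟩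
    rw [PySem.Int.floordiv_eq_ediv_of_pos (by norm_num : (0:Int) < 3), mangoGo_eq]
    ring
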